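-- pv_equiv track=rewrite | github.com/BSanandu88/Programming-Data-structures-and-Algorithms-in-Python | week4/gpa2.py | findMasterTank
-- ===== SOURCE A (Python) =====
-- from collections import deque
--
-- class myStack:
--     def __init__(self):
--         self.stack = deque()
--     def pop(self):
--         return self.stack.pop()
--     def push(self,x):
--         return self.stack.append(x)
--     def isEmpty(self):
--         return False if self.stack else True
--
-- def runDFSforTank(tanks,Glist,t,visited):
--     s = myStack()
--     s.push(t)
--     visited[t] = True
--     while not s.isEmpty():
--         i = s.pop()
--         for p in Glist[i]:
--             if not visited[p]:
--                 s.push(p)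
--                 visited[p] = True
--
-- def findMasterTank(tanks,pipes):
--     GList = {}
--     for i in tanks:
--         GList[i] = []
--     for(i,j) in pipes:
--         GList[i].append(j)
--     visited = {t:False for t in tanks}
--     lastVisited = tanks[0]
--     for t in tanks:
--         if not visited[t]:
--             runDFSforTank(tanks,GList,t,visited)
--             lastVisited = t
--
--     visited = {t : False for t in tanks}
--     runDFSforTank(tanks,GList,lastVisited,visited)
--     for v in visited:
--         if not visited[v]:
--             return 0
--     return lastVisited
-- ===== SOURCE B (Python) =====
-- def findMasterTank(tanks, pipes):
--     adj = {t: [] for t in tanks}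
--     for (i, j) in pipes:
--         adj[i].append(j)
--
--     def reach(s):
--         # round-based saturation: len(tanks) rounds always reach the fixpoint
--         r = {s}
--         for _ in tanks:
--             r = r | {q for u in r for q in adj[u]}
--         return r
--
--     covered = set()
--     candidate = tanks[0]
--     for t in tanks:
--         if t not in covered:
--             covered |= reach(t)
--             candidate = t
--     r = reach(candidate)
--     return candidate if all(t in r for t in tanks) else 0
-- ===== Notes on version B (the rewrite author's own statement) =====
-- stated objective: alternative
-- what changed: The explicit-stack DFS over a mutable visited dict is replaced by a round-based set-saturation reachability (len(tanks) rounds of frontier expansion on immutable sets), and the per-component accumulation unions full reachability sets instead of resuming a shared visited dict.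
import Mathlib
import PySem

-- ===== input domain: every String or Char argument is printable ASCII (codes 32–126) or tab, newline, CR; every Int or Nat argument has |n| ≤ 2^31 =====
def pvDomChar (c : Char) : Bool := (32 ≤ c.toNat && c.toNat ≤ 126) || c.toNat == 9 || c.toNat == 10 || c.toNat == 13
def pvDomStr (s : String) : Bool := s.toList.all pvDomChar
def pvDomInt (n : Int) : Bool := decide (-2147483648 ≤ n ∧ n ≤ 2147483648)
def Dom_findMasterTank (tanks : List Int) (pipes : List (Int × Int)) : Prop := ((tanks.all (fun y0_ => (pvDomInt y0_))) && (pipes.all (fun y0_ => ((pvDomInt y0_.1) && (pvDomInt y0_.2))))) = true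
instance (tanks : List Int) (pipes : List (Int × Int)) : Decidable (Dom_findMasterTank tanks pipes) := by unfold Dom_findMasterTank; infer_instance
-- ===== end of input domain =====

-- B replaces A's explicit-stack DFS on a mutable visited dict by round-based set
-- saturation of full reachability sets (objective: alternative; return value only —
-- A's helper mutates its local dicts, neither version mutates the caller's arguments).

-- ===== PORT A =====

-- termination measure for the while-loop: every push marks a previously unmarked
-- vertex of the (finite) neighbour universe, so (unmarked count + stack size) drops.
def runDFSmeasure (Glist : PySem.Dict Int (List Int)) (visited : PySem.Dict Int Bool) : Nat :=
  (Glist.values.flatten.dedup.countP (fun x => !(visited.getD x false))).succ - 1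

-- the body of "for p in Glist[i]: if not visited[p]: push p; visited[p] = True"
def runDFSstep (visited : PySem.Dict Int Bool) (stack : List Int) (nbrs : List Int) :
    PySem.Dict Int Bool × List Int :=
  nbrs.foldl (fun vs p =>
    if vs.1.getD p false = false then (vs.1.insert p true, p :: vs.2) else vs)
    (visited, stack)

theorem pv_countP_lt {α : Type} (l : List α) (f f' : α → Bool)
    (hmono : ∀ x ∈ l, f' x = true → f x = true) (x : α) (hx : x ∈ l)
    (hfx : f x = true) (hfx' : f' x = false) : l.countP f' < l.countP f := by
  induction l with
  | nil => cases hx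
  | cons a l ih =>
    simp only [List.countP_cons]
    rcases List.mem_cons.1 hx with rfl | hx
    · have : l.countP f' ≤ l.countP f :=
        List.countP_mono_left (fun y hy => hmono y (List.mem_cons_of_mem _ hy))
      simp [hfx, hfx']; omega
    · by_cases hfa : f' a = true
      · have hfa2 : f a = true := hmono a List.mem_cons_self hfa
        have h1 := ih (fun y hy h => hmono y (List.mem_cons_of_mem _ hy) h) hx
        simp [hfa, hfa2]; omega
      · have h1 := ih (fun y hy h => hmono y (List.mem_cons_of_mem _ hy) h) hx
        simp only [Bool.not_eq_true] at hfa
        simp [hfa]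
        split <;> omega

theorem pv_mem_getD_values (G : PySem.Dict Int (List Int)) (i : Int) (p : Int)
    (hp : p ∈ G.getD i []) : p ∈ G.values.flatten := by
  rw [PySem.Dict.getD_eq_get?_getD] at hp
  cases hg : G.get? i with
  | none => rw [hg] at hp; simp at hp
  | some l =>
    rw [hg] at hp
    simp only [Option.getD_some] at hp
    have hmem := PySem.Dict.mem_items_of_get?_eq_some G hg
    have : l ∈ G.values := by
      simp only [PySem.Dict.values]
      exact List.mem_map.2 ⟨(i, l), hmem, rfl⟩
    exact List.mem_flatten.2 ⟨l, this, hp⟩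

theorem pv_step_measure (G : PySem.Dict Int (List Int)) :
    ∀ (nbrs : List Int) (v : PySem.Dict Int Bool) (s : List Int),
    (∀ p ∈ nbrs, p ∈ G.values.flatten) →
    runDFSmeasure G (runDFSstep v s nbrs).1 + (runDFSstep v s nbrs).2.length ≤
      runDFSmeasure G v + s.length := by
  intro nbrs
  induction nbrs with
  | nil => intro v s _; simp [runDFSstep]
  | cons p nbrs ih =>
    intro v s hmem
    have hp : p ∈ G.values.flatten := hmem p List.mem_cons_self
    have hrest : ∀ q ∈ nbrs, q ∈ G.values.flatten := fun q hq => hmem q (List.mem_cons_of_mem _ hq)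
    by_cases hg : v.getD p false = false
    · have heq : runDFSstep v s (p :: nbrs) = runDFSstep (v.insert p true) (p :: s) nbrs := by
        simp [runDFSstep, hg]
      rw [heq]
      have hlt : runDFSmeasure G (v.insert p true) < runDFSmeasure G v := by
        unfold runDFSmeasure
        have : G.values.flatten.dedup.countP (fun x => !((v.insert p true).getD x false)) <
            G.values.flatten.dedup.countP (fun x => !(v.getD x false)) := by
          refine pv_countP_lt _ _ _ ?_ p (List.mem_dedup.2 hp) ?_ ?_
          · intro x _ hx
            simp only [PySem.Dict.getD_insert] at hx
            split at hx
            · simp at hx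
            · exact hx
          · simp [hg]
          · simp [PySem.Dict.getD_insert_self]
        omega
      have := ih (v.insert p true) (p :: s) hrest
      simp only [List.length_cons] at *
      omega
    · have heq : runDFSstep v s (p :: nbrs) = runDFSstep v s nbrs := by
        simp [runDFSstep, hg]
      rw [heq]; exact ih v s hrest

-- "while not s.isEmpty(): i = s.pop(); for p in Glist[i]: …" (stack top = list head)
def runDFSloop (Glist : PySem.Dict Int (List Int)) (visited : PySem.Dict Int Bool)
    (stack : List Int) : PySem.Dict Int Bool :=
  match stack with
  | [] => visited
  | i :: rest =>
    let vs := runDFSstep visited rest (Glist.getD i [])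
    runDFSloop Glist vs.1 vs.2
termination_by runDFSmeasure Glist visited + stack.length
decreasing_by
  have h := pv_step_measure Glist (Glist.getD i []) visited rest
      (fun p hp => pv_mem_getD_values Glist i p hp)
  simp only [List.length_cons]
  omega

def runDFSforTank (tanks : List Int) (Glist : PySem.Dict Int (List Int)) (t : Int)
    (visited : PySem.Dict Int Bool) : PySem.Dict Int Bool :=
  runDFSloop Glist (visited.insert t true) [t]

-- GList = {}; for i in tanks: GList[i] = []; for (i,j) in pipes: GList[i].append(j)
-- (the append is Dict.modify with default []; exact when i is a key — Pre_ guarantees it,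
--  Python raises KeyError otherwise)
def buildGList (tanks : List Int) (pipes : List (Int × Int)) : PySem.Dict Int (List Int) :=
  pipes.foldl (fun d p => d.modify p.1 [] (fun l => l ++ [p.2]))
    (tanks.foldl (fun d i => d.insert i ([] : List Int)) PySem.Dict.empty)

-- visited = {t: False for t in tanks}
def initVisited (tanks : List Int) : PySem.Dict Int Bool :=
  tanks.foldl (fun d t => d.insert t false) PySem.Dict.empty

def findMasterTank (tanks : List Int) (pipes : List (Int × Int)) : Int :=
  let G := buildGList tanks pipes
  -- lastVisited = tanks[0]  (IndexError on []: excluded by Pre_)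
  let st := tanks.foldl (fun (st : PySem.Dict Int Bool × Int) t =>
      if st.1.getD t false = false then (runDFSforTank tanks G t st.1, t) else st)
    (initVisited tanks, tanks.headD 0)
  let vis2 := runDFSforTank tanks G st.2 (initVisited tanks)
  -- for v in visited: if not visited[v]: return 0 / return lastVisited
  if vis2.keys.all (fun v => vis2.getD v false) then st.2 else 0

-- ===== PORT B =====

-- r | {q for u in r for q in adj[u]}   (one saturation round)
def reachStep (adjD : PySem.Dict Int (List Int)) (r : PySem.Set Int) : PySem.Set Int :=
  PySem.Set.union r (PySem.Set.ofList (r.flatMap (fun u => adjD.getD u [])))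

-- reach(s): r = {s}; for _ in tanks: r = r | {…}; return r
def reachB (tanks : List Int) (adjD : PySem.Dict Int (List Int)) (s : Int) : PySem.Set Int :=
  tanks.foldl (fun r _ => reachStep adjD r) (PySem.Set.ofList [s])

def findMasterTank_alt (tanks : List Int) (pipes : List (Int × Int)) : Int :=
  let adjD := buildGList tanks pipes   -- B builds adj with the same two loops as A
  let st := tanks.foldl (fun (st : PySem.Set Int × Int) t =>
      if t ∈ st.1 then st else (PySem.Set.union st.1 (reachB tanks adjD t), t))
    (PySem.Set.empty, tanks.headD 0)
  let r := reachB tanks adjD st.2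
  if tanks.all (fun t => decide (t ∈ r)) then st.2 else 0

-- ===== PRECONDITION & SPEC =====
-- Pre_ excludes exactly the inputs where A raises: tanks = [] (IndexError on tanks[0])
-- and pipes with an endpoint outside tanks (KeyError on GList[i].append / visited[p]).
def Pre_findMasterTank (tanks : List Int) (pipes : List (Int × Int)) : Prop :=
  tanks ≠ [] ∧ ∀ p ∈ pipes, p.1 ∈ tanks ∧ p.2 ∈ tanks
instance (tanks : List Int) (pipes : List (Int × Int)) : Decidable (Pre_findMasterTank tanks pipes) := by
  unfold Pre_findMasterTank; infer_instance

def pvWitness_findMasterTank : List Int × (List (Int × Int)) := ([1, 2], [(1, 2)])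

def Spec_findMasterTank (tanks : List Int) (pipes : List (Int × Int)) (out : Int) : Prop :=
  out = findMasterTank_alt tanks pipes
instance (tanks : List Int) (pipes : List (Int × Int)) (out : Int) : Decidable (Spec_findMasterTank tanks pipes out) := by
  unfold Spec_findMasterTank; infer_instance

-- ===== CLAIM (what is proved, stated in full; the proofs are below) =====
def Claim_equal_findMasterTank : Prop := ∀ (tanks : List Int) (pipes : List (Int × Int)), Dom_findMasterTank tanks pipes → Pre_findMasterTank tanks pipes → Spec_findMasterTank tanks pipes (findMasterTank tanks pipes)


-- ===== LEMMAS AND PROOFS =====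

-- adjacency function read off a GList dict
def adjG (G : PySem.Dict Int (List Int)) : Int → List Int := fun i => G.getD i []

-- truth of a visited dict
def vf (d : PySem.Dict Int Bool) : Int → Bool := fun x => d.getD x false

-- reachability from t along adj, stepping only out of vertices where av is false
inductive RA (adj : Int → List Int) (av : Int → Bool) : Int → Int → Prop
  | refl (t : Int) : RA adj av t t
  | step {t a b : Int} : RA adj av t a → av a = false → b ∈ adj a → RA adj av t b

theorem RA_to_reach {adj : Int → List Int} {av : Int → Bool} {t x : Int}
    (h : RA adj av t x) : RA adj (fun _ => false) t x := by
  induction h with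
  | refl => exact RA.refl _
  | step _ _ hb ih => exact RA.step ih rfl hb

-- absorption: past a closed marked set, avoid-reachability and plain reachability agree
theorem RA_absorb {adj : Int → List Int} {S : Int → Bool}
    (hcl : ∀ a b, S a = true → b ∈ adj a → S b = true) (t x : Int) :
    (S x = true ∨ RA adj S t x) ↔ (S x = true ∨ RA adj (fun _ => false) t x) := by
  constructor
  · exact Or.imp_right RA_to_reach
  · rintro (h | h)
    · exact Or.inl h
    · induction h with
      | refl => exact Or.inr (RA.refl _)
      | step _ _ hb ih =>
        rename_i a b _ _
        rcases ih with hS | hra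
        · exact Or.inl (hcl _ _ hS hb)
        · by_cases hSa : S a = true
          · exact Or.inl (hcl _ _ hSa hb)
          · exact Or.inr (RA.step hra (by simpa using hSa) hb)

-- ---- the stack-DFS inner fold: all invariants it preserves ----
theorem step_props (adj : Int → List Int) (v₀ : Int → Bool) (t i : Int)
    (hRAi : RA adj v₀ t i) (hv₀i : v₀ i = false) :
    ∀ (l : List Int), (∀ p ∈ l, p ∈ adj i) →
    ∀ (v : PySem.Dict Int Bool) (s : List Int),
    (∀ x, v₀ x = true → vf v x = true) →
    (∀ q ∈ s, vf v q = true ∧ v₀ q = false ∧ RA adj v₀ t q) →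
    (∀ x, vf v x = true → v₀ x = true ∨ RA adj v₀ t x) →
    (∀ x, vf v x = true → vf (runDFSstep v s l).1 x = true) ∧
    (∀ q ∈ s, q ∈ (runDFSstep v s l).2) ∧
    (∀ p ∈ l, vf (runDFSstep v s l).1 p = true) ∧
    (∀ x, vf (runDFSstep v s l).1 x = true → vf v x = true ∨ x ∈ (runDFSstep v s l).2) ∧
    (∀ x, v₀ x = true → vf (runDFSstep v s l).1 x = true) ∧
    (∀ q ∈ (runDFSstep v s l).2, vf (runDFSstep v s l).1 q = true ∧ v₀ q = false ∧ RA adj v₀ t q) ∧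
    (∀ x, vf (runDFSstep v s l).1 x = true → v₀ x = true ∨ RA adj v₀ t x) := by
  intro l
  induction l with
  | nil =>
    intro _ v s H1 H2 H3
    simp only [runDFSstep, List.foldl_nil]
    exact ⟨fun x h => h, fun q h => h, by simp, fun x h => Or.inl h, H1, H2, H3⟩
  | cons p l ih =>
    intro hl v s H1 H2 H3
    by_cases hg : v.getD p false = false
    · have heq : runDFSstep v s (p :: l) = runDFSstep (v.insert p true) (p :: s) l := by
        simp [runDFSstep, hg]
      have hvp' : vf (v.insert p true) p = true := by
        simp [vf, PySem.Dict.getD_insert_self]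
      have hmono1 : ∀ x, vf v x = true → vf (v.insert p true) x = true := by
        intro x hx
        simp only [vf, PySem.Dict.getD_insert]
        split
        · rfl
        · exact hx
      have hv₀p : v₀ p = false := by
        by_contra h
        have := H1 p (Bool.not_eq_false _ ▸ eq_true_of_ne_false h)
        simp [vf, hg] at this
      have hRAp : RA adj v₀ t p := RA.step hRAi hv₀i (hl p List.mem_cons_self)
      have H1' : ∀ x, v₀ x = true → vf (v.insert p true) x = true :=
        fun x hx => hmono1 x (H1 x hx)
      have H2' : ∀ q ∈ p :: s, vf (v.insert p true) q = true ∧ v₀ q = false ∧ RA adj v₀ t q := by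
        intro q hq
        rcases List.mem_cons.1 hq with rfl | hq
        · exact ⟨hvp', hv₀p, hRAp⟩
        · obtain ⟨h1, h2, h3⟩ := H2 q hq
          exact ⟨hmono1 q h1, h2, h3⟩
      have H3' : ∀ x, vf (v.insert p true) x = true → v₀ x = true ∨ RA adj v₀ t x := by
        intro x hx
        by_cases hxp : x = p
        · subst hxp; exact Or.inr hRAp
        · refine H3 x ?_
          simpa [vf, PySem.Dict.getD_insert, hxp] using hx
      obtain ⟨pa, pb, pc, pd, pe, pf, pg⟩ :=
        ih (fun q hq => hl q (List.mem_cons_of_mem _ hq)) (v.insert p true) (p :: s) H1' H2' H3'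
      rw [heq]
      refine ⟨?_, ?_, ?_, ?_, pe, pf, pg⟩
      · exact fun x hx => pa x (hmono1 x hx)
      · exact fun q hq => pb q (List.mem_cons_of_mem _ hq)
      · intro q hq
        rcases List.mem_cons.1 hq with rfl | hq
        · exact pa q hvp'
        · exact pc q hq
      · intro x hx
        rcases pd x hx with hv' | hin
        · by_cases hxp : x = p
          · subst hxp; exact Or.inr (pb x List.mem_cons_self)
          · left; simpa [vf, PySem.Dict.getD_insert, hxp] using hv'
        · exact Or.inr hin
    · have heq : runDFSstep v s (p :: l) = runDFSstep v s l := by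
        simp [runDFSstep, hg]
      obtain ⟨pa, pb, pc, pd, pe, pf, pg⟩ :=
        ih (fun q hq => hl q (List.mem_cons_of_mem _ hq)) v s H1 H2 H3
      rw [heq]
      refine ⟨pa, pb, ?_, pd, pe, pf, pg⟩
      intro q hq
      rcases List.mem_cons.1 hq with rfl | hq
      · exact pa q (by simpa [vf] using Bool.not_eq_false _ ▸ eq_true_of_ne_false hg)
      · exact pc q hq

-- ---- the stack-DFS while loop computes exactly old ∪ avoid-reachable ----
theorem loop_char (G : PySem.Dict Int (List Int)) (v₀ : Int → Bool) (t : Int) :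
    ∀ (v : PySem.Dict Int Bool) (s : List Int),
    vf v t = true →
    (∀ x, v₀ x = true → vf v x = true) →
    (∀ q ∈ s, vf v q = true ∧ v₀ q = false ∧ RA (adjG G) v₀ t q) →
    (∀ x, vf v x = true → v₀ x = true ∨ RA (adjG G) v₀ t x) →
    (∀ a, vf v a = true → v₀ a = false → a ∈ s ∨ ∀ b ∈ adjG G a, vf v b = true) →
    ∀ x, (vf (runDFSloop G v s) x = true ↔ (v₀ x = true ∨ RA (adjG G) v₀ t x)) := by
  intro v s
  induction v, s using runDFSloop.induct G with
  | case1 v =>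
    intro H0 H1 _ H3 H4 x
    simp only [runDFSloop]
    constructor
    · exact H3 x
    · rintro (h | h)
      · exact H1 x h
      · induction h with
        | refl => exact H0
        | step _ hav hb ih =>
          rcases H4 _ ih hav with h | h
          · cases h
          · exact h _ hb
  | case2 v i rest vs ih =>
    intro H0 H1 H2 H3 H4 x
    obtain ⟨hvi, hv₀i, hRAi⟩ := H2 i List.mem_cons_self
    obtain ⟨pa, pb, pc, pd, pe, pf, pg⟩ :=
      step_props (adjG G) v₀ t i hRAi hv₀i (adjG G i) (fun p hp => hp) v rest H1
        (fun q hq => H2 q (List.mem_cons_of_mem _ hq)) H3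
    simp only [runDFSloop]
    refine ih (pa t H0) pe pf pg ?_ x
    intro a ha hv₀a
    rcases pd a ha with hold | hin
    · rcases H4 a hold hv₀a with hmem | hall
      · rcases List.mem_cons.1 hmem with rfl | hmem'
        · exact Or.inr fun b hb => pc b hb
        · exact Or.inl (pb a hmem')
      · exact Or.inr fun b hb => pa b (hall b hb)
    · exact Or.inl hin

theorem runDFS_char (tanks : List Int) (G : PySem.Dict Int (List Int)) (t : Int)
    (v : PySem.Dict Int Bool) (h0 : vf v t = false) :
    ∀ x, vf (runDFSforTank tanks G t v) x = true ↔
      (vf v x = true ∨ RA (adjG G) (vf v) t x) := by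
  intro x
  unfold runDFSforTank
  refine loop_char G (vf v) t (v.insert t true) [t] ?_ ?_ ?_ ?_ ?_ x
  · simp [vf, PySem.Dict.getD_insert_self]
  · intro y hy
    simp only [vf, PySem.Dict.getD_insert]
    split
    · rfl
    · exact hy
  · intro q hq
    rcases List.mem_singleton.1 hq with rfl
    exact ⟨by simp [vf, PySem.Dict.getD_insert_self], h0, RA.refl q⟩
  · intro y hy
    by_cases hyt : y = t
    · subst hyt; exact Or.inr (RA.refl y)
    · left; simpa [vf, PySem.Dict.getD_insert, hyt] using hy
  · intro a ha hva
    by_cases hat : a = t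
    · subst hat; exact Or.inl (List.mem_singleton_self _)
    · exfalso
      have : vf v a = true := by simpa [vf, PySem.Dict.getD_insert, hat] using ha
      rw [this] at hva; cases hva

-- ---- the DFS never creates new keys (all touched vertices are already keys) ----
theorem step_keys (v : PySem.Dict Int Bool) (s : List Int) :
    ∀ (l : List Int), (∀ p ∈ l, v.contains p = true) →
    (∀ x, (runDFSstep v s l).1.contains x = v.contains x) ∧
    (runDFSstep v s l).1.keys = v.keys := by
  intro l
  induction l generalizing v s with
  | nil =>
    intro _
    constructor <;> simp [runDFSstep]
  | cons p l ih =>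
    intro hl
    have hcp : v.contains p = true := hl p List.mem_cons_self
    by_cases hg : v.getD p false = false
    · have heq : runDFSstep v s (p :: l) = runDFSstep (v.insert p true) (p :: s) l := by
        simp [runDFSstep, hg]
      have hck : ∀ x, (v.insert p true).contains x = v.contains x := by
        intro x
        rw [PySem.Dict.contains_insert]
        by_cases hxp : x = p
        · subst hxp; simp [hcp]
        · simp [hxp]
      obtain ⟨ih1, ih2⟩ := ih (v.insert p true) (p :: s)
        (fun q hq => by rw [hck q]; exact hl q (List.mem_cons_of_mem _ hq))
      rw [heq]
      refine ⟨fun x => (ih1 x).trans (hck x), ih2.trans ?_⟩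
      exact PySem.Dict.keys_insert_of_contains v true hcp
    · have heq : runDFSstep v s (p :: l) = runDFSstep v s l := by
        simp [runDFSstep, hg]
      rw [heq]
      exact ih v s (fun q hq => hl q (List.mem_cons_of_mem _ hq))

theorem loop_keys (G : PySem.Dict Int (List Int)) :
    ∀ (v : PySem.Dict Int Bool) (s : List Int),
    (∀ i p, p ∈ G.getD i [] → v.contains p = true) →
    (∀ x, (runDFSloop G v s).contains x = v.contains x) ∧
    (runDFSloop G v s).keys = v.keys := by
  intro v s
  induction v, s using runDFSloop.induct G with
  | case1 v =>
    intro _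
    constructor <;> simp [runDFSloop]
  | case2 v i rest vs ih =>
    intro hG
    obtain ⟨s1, s2⟩ := step_keys v rest (G.getD i []) (fun p hp => hG i p hp)
    simp only [runDFSloop]
    obtain ⟨l1, l2⟩ := ih (fun j p hp => by rw [s1 p]; exact hG j p hp)
    exact ⟨fun x => (l1 x).trans (s1 x), l2.trans s2⟩

theorem runDFS_keys (tanks : List Int) (G : PySem.Dict Int (List Int)) (t : Int)
    (v : PySem.Dict Int Bool) (ht : v.contains t = true)
    (hG : ∀ i p, p ∈ G.getD i [] → v.contains p = true) :
    (runDFSforTank tanks G t v).keys = v.keys := by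
  unfold runDFSforTank
  have hck : ∀ x, (v.insert t true).contains x = v.contains x := by
    intro x
    rw [PySem.Dict.contains_insert]
    by_cases hxt : x = t
    · subst hxt; simp [ht]
    · simp [hxt]
  obtain ⟨_, l2⟩ := loop_keys G (v.insert t true) [t]
    (fun i p hp => (hck p) ▸ hG i p hp)
  exact l2.trans (PySem.Dict.keys_insert_of_contains v true ht)

-- ---- the two initial dicts ----
theorem getD_initG (tanks : List Int) (i : Int) :
    (tanks.foldl (fun d j => d.insert j ([] : List Int)) PySem.Dict.empty).getD i [] = [] := by
  suffices h : ∀ (d : PySem.Dict Int (List Int)), d.getD i [] = [] →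
      (tanks.foldl (fun d j => d.insert j ([] : List Int)) d).getD i [] = [] by
    exact h _ (by simp [PySem.Dict.getD_empty])
  induction tanks with
  | nil => intro d hd; simpa using hd
  | cons a l ihl =>
    intro d hd
    simp only [List.foldl_cons]
    refine ihl _ ?_
    rw [PySem.Dict.getD_insert]
    split <;> simp [hd]

theorem getD_buildGList (tanks : List Int) (pipes : List (Int × Int)) (i : Int) :
    (buildGList tanks pipes).getD i [] = (pipes.filter (fun p => p.1 == i)).map (·.2) := by
  unfold buildGList
  rw [PySem.Dict.getD_foldl_modify_append, getD_initG]
  simp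

theorem getD_initVisited (tanks : List Int) (x : Int) :
    (initVisited tanks).getD x false = false := by
  unfold initVisited
  suffices h : ∀ (d : PySem.Dict Int Bool), d.getD x false = false →
      (tanks.foldl (fun d t => d.insert t false) d).getD x false = false by
    exact h _ (by simp [PySem.Dict.getD_empty])
  induction tanks with
  | nil => intro d hd; simpa using hd
  | cons a l ihl =>
    intro d hd
    simp only [List.foldl_cons]
    refine ihl _ ?_
    rw [PySem.Dict.getD_insert]
    split <;> simp [hd]

theorem keys_initVisited (tanks : List Int) :
    (initVisited tanks).keys = PySem.Set.ofList tanks := by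
  unfold initVisited
  rw [PySem.Dict.keys_foldl_insert, PySem.Dict.keys_empty, PySem.Set.update_nil_left]

-- ---- B-side: round-based saturation computes exactly reachability ----
theorem mem_reachStep (G : PySem.Dict Int (List Int)) (r : PySem.Set Int) (x : Int) :
    x ∈ reachStep G r ↔ x ∈ r ∨ ∃ u ∈ r, x ∈ G.getD u [] := by
  unfold reachStep
  rw [PySem.Set.mem_union]
  simp [PySem.Set.mem_ofList _ _, List.mem_flatMap]

theorem reachStep_append (G : PySem.Dict Int (List Int)) (r : PySem.Set Int) :
    ∃ e, reachStep G r = r ++ e := by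
  unfold reachStep
  rw [show PySem.Set.union r _ = PySem.Set.update r _ from rfl,
      PySem.Set.update_eq_append_filter]
  exact ⟨_, rfl⟩

theorem foldl_const_iterate {α β : Type} (l : List α) (f : β → β) (b : β) :
    l.foldl (fun r _ => f r) b = f^[l.length] b := by
  induction l generalizing b with
  | nil => rfl
  | cons a l ihl => simp [List.foldl_cons, ihl, Function.iterate_succ_apply]

theorem reachB_char (tanks : List Int) (G : PySem.Dict Int (List Int)) (s : Int)
    (hs : s ∈ tanks) (hadj : ∀ u p, p ∈ G.getD u [] → p ∈ tanks) :
    ∀ x, x ∈ reachB tanks G s ↔ RA (adjG G) (fun _ => false) s x := by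
  have hfold : reachB tanks G s =
      (reachStep G)^[tanks.length] (PySem.Set.ofList [s]) := by
    unfold reachB
    exact foldl_const_iterate tanks (reachStep G) _
  set R0 : PySem.Set Int := PySem.Set.ofList [s] with hR0
  set f : PySem.Set Int → PySem.Set Int := reachStep G with hf
  have hinv : ∀ k, (f^[k] R0).Nodup ∧ (∀ x ∈ f^[k] R0, x ∈ tanks) ∧
      (∀ x ∈ f^[k] R0, RA (adjG G) (fun _ => false) s x) := by
    intro k
    induction k with
    | zero =>
      refine ⟨PySem.Set.nodup_ofList _, ?_, ?_⟩ <;>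
        · intro x hx
          rcases List.mem_singleton.1 ((PySem.Set.mem_ofList _ _).1 hx) with rfl
          first
          | exact hs
          | exact RA.refl x
    | succ k ihk =>
      obtain ⟨h1, h2, h3⟩ := ihk
      rw [Function.iterate_succ_apply']
      refine ⟨PySem.Set.nodup_union _ _ h1, ?_, ?_⟩
      · intro x hx
        rcases (mem_reachStep G _ x).1 hx with hx | ⟨u, hu, hxu⟩
        · exact h2 x hx
        · exact hadj u x hxu
      · intro x hx
        rcases (mem_reachStep G _ x).1 hx with hx | ⟨u, hu, hxu⟩
        · exact h3 x hx
        · exact RA.step (h3 u hu) rfl hxu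
  have hmono : ∀ k x, x ∈ f^[k] R0 → x ∈ f^[k+1] R0 := by
    intro k x hx
    rw [Function.iterate_succ_apply']
    exact (mem_reachStep G _ x).2 (Or.inl hx)
  have hplateau : ∃ k < tanks.length, f^[k+1] R0 = f^[k] R0 := by
    by_contra hno
    push_neg at hno
    have hgrow : ∀ k < tanks.length, (f^[k] R0).length < (f^[k+1] R0).length := by
      intro k hk
      obtain ⟨e, he⟩ := reachStep_append G (f^[k] R0)
      have he' : f^[k+1] R0 = f^[k] R0 ++ e := by
        rw [Function.iterate_succ_apply']; exact he
      rcases e with _ | ⟨y, e⟩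
      · exact absurd (by rw [he']; simp) (hno k hk)
      · rw [he']; simp
    have hstep : ∀ k, k ≤ tanks.length → k + 1 ≤ (f^[k] R0).length := by
      intro k
      induction k with
      | zero => intro _; simp [hR0, PySem.Set.ofList]
      | succ k ihk =>
        intro hk
        have h1 := ihk (Nat.le_of_succ_le hk)
        have h2 := hgrow k (Nat.lt_of_succ_le hk)
        omega
    have hle : (f^[tanks.length] R0).length ≤ tanks.length := by
      obtain ⟨h1, h2, _⟩ := hinv tanks.length
      have hsub : f^[tanks.length] R0 ⊆ tanks.dedup := fun x hx => List.mem_dedup.2 (h2 x hx)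
      exact ((List.subperm_of_subset h1 hsub).length_le).trans (List.dedup_sublist tanks).length_le
    have := hstep tanks.length le_rfl
    omega
  obtain ⟨k, hk, hfix⟩ := hplateau
  have hstab : ∀ m, k ≤ m → f^[m] R0 = f^[k] R0 := by
    intro m hm
    induction m, hm using Nat.le_induction with
    | base => rfl
    | succ m hm ihm =>
      rw [Function.iterate_succ_apply', ihm]
      exact (Function.iterate_succ_apply' f k R0).symm.trans hfix
  have hsmem : s ∈ f^[k] R0 := by
    have h0 : s ∈ R0 := (PySem.Set.mem_ofList _ _).2 (List.mem_singleton_self _)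
    clear hfix hstab hk
    induction k with
    | zero => exact h0
    | succ k ihk => exact hmono k s ihk
  intro x
  rw [hfold, hstab tanks.length (Nat.le_of_lt hk)]
  constructor
  · exact fun hx => (hinv k).2.2 x hx
  · intro hra
    induction hra with
    | refl => exact hsmem
    | step _ _ hb ihra =>
      rename_i a b hx1 hx2
      have hbmem : b ∈ f^[k+1] R0 := by
        rw [Function.iterate_succ_apply']
        exact (mem_reachStep G _ b).2 (Or.inr ⟨a, ihra, hb⟩)
      rwa [hstab (k+1) (Nat.le_succ k)] at hbmem

-- ---- phase 1: the two accumulation loops stay in lockstep ----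
theorem phase1 (tanks : List Int) (G : PySem.Dict Int (List Int))
    (hadj : ∀ u p, p ∈ G.getD u [] → p ∈ tanks) :
    ∀ (ts : List Int), (∀ t ∈ ts, t ∈ tanks) →
    ∀ (visA : PySem.Dict Int Bool) (cov : PySem.Set Int) (c : Int),
    c ∈ tanks →
    (∀ x, vf visA x = true ↔ x ∈ cov) →
    (∀ a ∈ cov, ∀ b ∈ G.getD a [], b ∈ cov) →
    visA.keys = (initVisited tanks).keys →
    ((ts.foldl (fun (st : PySem.Dict Int Bool × Int) t =>
        if st.1.getD t false = false then (runDFSforTank tanks G t st.1, t) else st)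
        (visA, c)).2 =
      (ts.foldl (fun (st : PySem.Set Int × Int) t =>
        if t ∈ st.1 then st else (PySem.Set.union st.1 (reachB tanks G t), t))
        (cov, c)).2 ∧
     (ts.foldl (fun (st : PySem.Set Int × Int) t =>
        if t ∈ st.1 then st else (PySem.Set.union st.1 (reachB tanks G t), t))
        (cov, c)).2 ∈ tanks ∧
     (∀ x, vf (ts.foldl (fun (st : PySem.Dict Int Bool × Int) t =>
        if st.1.getD t false = false then (runDFSforTank tanks G t st.1, t) else st)
        (visA, c)).1 x = true ↔
       x ∈ (ts.foldl (fun (st : PySem.Set Int × Int) t =>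
        if t ∈ st.1 then st else (PySem.Set.union st.1 (reachB tanks G t), t))
        (cov, c)).1) ∧
     (ts.foldl (fun (st : PySem.Dict Int Bool × Int) t =>
        if st.1.getD t false = false then (runDFSforTank tanks G t st.1, t) else st)
        (visA, c)).1.keys = (initVisited tanks).keys) := by
  intro ts
  induction ts with
  | nil =>
    intro _ visA cov c hc hiff _ hkeys
    exact ⟨rfl, hc, hiff, hkeys⟩
  | cons t ts ihts =>
    intro hts visA cov c hc hiff hcl hkeys
    have htt : t ∈ tanks := hts t List.mem_cons_self
    have hts' : ∀ q ∈ ts, q ∈ tanks := fun q hq => hts q (List.mem_cons_of_mem _ hq)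
    by_cases hm : t ∈ cov
    · have hA : visA.getD t false = true := (hiff t).2 hm
      have eA : (List.foldl (fun (st : PySem.Dict Int Bool × Int) t =>
          if st.1.getD t false = false then (runDFSforTank tanks G t st.1, t) else st)
          (visA, c) (t :: ts)) =
        (List.foldl (fun (st : PySem.Dict Int Bool × Int) t =>
          if st.1.getD t false = false then (runDFSforTank tanks G t st.1, t) else st)
          (visA, c) ts) := by
        rw [List.foldl_cons]; simp [hA]
      have eB : (List.foldl (fun (st : PySem.Set Int × Int) t =>
          if t ∈ st.1 then st else (PySem.Set.union st.1 (reachB tanks G t), t))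
          (cov, c) (t :: ts)) =
        (List.foldl (fun (st : PySem.Set Int × Int) t =>
          if t ∈ st.1 then st else (PySem.Set.union st.1 (reachB tanks G t), t))
          (cov, c) ts) := by
        rw [List.foldl_cons]; simp [hm]
      rw [eA, eB]
      exact ihts hts' visA cov c hc hiff hcl hkeys
    · have hA : visA.getD t false = false := by
        have := (hiff t)
        rcases h : visA.getD t false
        · rfl
        · exact absurd (this.1 h) hm
      have eA : (List.foldl (fun (st : PySem.Dict Int Bool × Int) t =>
          if st.1.getD t false = false then (runDFSforTank tanks G t st.1, t) else st)
          (visA, c) (t :: ts)) =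
        (List.foldl (fun (st : PySem.Dict Int Bool × Int) t =>
          if st.1.getD t false = false then (runDFSforTank tanks G t st.1, t) else st)
          (runDFSforTank tanks G t visA, t) ts) := by
        rw [List.foldl_cons]; simp [hA]
      have eB : (List.foldl (fun (st : PySem.Set Int × Int) t =>
          if t ∈ st.1 then st else (PySem.Set.union st.1 (reachB tanks G t), t))
          (cov, c) (t :: ts)) =
        (List.foldl (fun (st : PySem.Set Int × Int) t =>
          if t ∈ st.1 then st else (PySem.Set.union st.1 (reachB tanks G t), t))
          (PySem.Set.union cov (reachB tanks G t), t) ts) := by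
        rw [List.foldl_cons]; simp [hm]
      rw [eA, eB]
      have hcont : ∀ x, x ∈ tanks → visA.contains x = true := by
        intro x hx
        rw [PySem.Dict.contains_iff_mem_keys, hkeys, keys_initVisited]
        exact (PySem.Set.mem_ofList _ _).2 hx
      have hchar := runDFS_char tanks G t visA (by simpa [vf] using hA)
      have hreach := reachB_char tanks G t htt hadj
      have habs := RA_absorb (adj := adjG G) (S := vf visA)
        (fun a b ha hb => (hiff b).2 (hcl a ((hiff a).1 ha) b hb)) t
      have hiff' : ∀ x, vf (runDFSforTank tanks G t visA) x = true ↔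
          x ∈ PySem.Set.union cov (reachB tanks G t) := by
        intro x
        rw [hchar x, PySem.Set.mem_union cov (reachB tanks G t) x, habs x, hiff x,
          ← hreach x]
      have hcl' : ∀ a ∈ PySem.Set.union cov (reachB tanks G t), ∀ b ∈ G.getD a [], b ∈ PySem.Set.union cov (reachB tanks G t) := by
        intro a ha b hb
        rw [PySem.Set.mem_union] at ha ⊢
        rcases ha with ha | ha
        · exact Or.inl (hcl a ha b hb)
        · exact Or.inr ((hreach b).2 (RA.step ((hreach a).1 ha) rfl hb))
      have hkeys' : (runDFSforTank tanks G t visA).keys = (initVisited tanks).keys :=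
        (runDFS_keys tanks G t visA (hcont t htt)
          (fun i p hp => hcont p (hadj i p hp))).trans hkeys
      exact ihts hts' _ _ t htt hiff' hcl' hkeys'


-- ===== VERDICT (by name: the statement is the Claim_ definition above) =====
theorem findMasterTank_spec : Claim_equal_findMasterTank := by
  intro tanks pipes _ hpre
  obtain ⟨hne, hpp⟩ := hpre
  unfold Spec_findMasterTank
  have hadj : ∀ u p, p ∈ (buildGList tanks pipes).getD u [] → p ∈ tanks := by
    intro u p hp
    rw [getD_buildGList] at hp
    obtain ⟨q, hq, rfl⟩ := List.mem_map.1 hp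
    exact (hpp q (List.mem_filter.1 hq).1).2
  have hhead : tanks.headD 0 ∈ tanks := by
    cases tanks with
    | nil => exact absurd rfl hne
    | cons a l => exact List.mem_cons_self
  obtain ⟨heq2, hcand, hchar, hkeys⟩ :=
    phase1 tanks (buildGList tanks pipes) hadj tanks (fun t ht => ht)
      (initVisited tanks) PySem.Set.empty (tanks.headD 0) hhead
      (by intro x; simp [vf, getD_initVisited, PySem.Set.empty])
      (by intro a ha; cases ha)
      rfl
  simp only [findMasterTank, findMasterTank_alt]
  rw [heq2]
  set G := buildGList tanks pipes with hG
  set c := (tanks.foldl (fun (st : PySem.Set Int × Int) t =>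
      if t ∈ st.1 then st else (PySem.Set.union st.1 (reachB tanks G t), t))
      (PySem.Set.empty, tanks.headD 0)).2 with hc
  have hv0 : vf (initVisited tanks) = fun _ => false := by
    funext x; exact getD_initVisited tanks x
  have hcont0 : ∀ x, x ∈ tanks → (initVisited tanks).contains x = true := by
    intro x hx
    rw [PySem.Dict.contains_iff_mem_keys, keys_initVisited]
    exact (PySem.Set.mem_ofList _ _).2 hx
  have h2char : ∀ x, vf (runDFSforTank tanks G c (initVisited tanks)) x = true ↔
      RA (adjG G) (fun _ => false) c x := by
    intro x
    rw [runDFS_char tanks G c (initVisited tanks) (by simp [vf, getD_initVisited]) x, hv0]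
    simp
  have hkeys2 : (runDFSforTank tanks G c (initVisited tanks)).keys = PySem.Set.ofList tanks :=
    (runDFS_keys tanks G c (initVisited tanks) (hcont0 c hcand)
      (fun i p hp => hcont0 p (hadj i p hp))).trans (keys_initVisited tanks)
  have hr := reachB_char tanks G c hcand hadj
  have hcond : ((runDFSforTank tanks G c (initVisited tanks)).keys.all
        (fun v => (runDFSforTank tanks G c (initVisited tanks)).getD v false)) =
      (tanks.all (fun t => decide (t ∈ reachB tanks G c))) := by
    have hbool : ∀ bb cc : Bool, (bb = true ↔ cc = true) → bb = cc := by decide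
    apply hbool
    simp only [List.all_eq_true, decide_eq_true_eq]
    constructor
    · intro h t ht
      have htk : t ∈ (runDFSforTank tanks G c (initVisited tanks)).keys := by
        rw [hkeys2]; exact (PySem.Set.mem_ofList _ _).2 ht
      exact (hr t).2 ((h2char t).1 (h t htk))
    · intro h v hv
      have hvt : v ∈ tanks := by
        rw [hkeys2] at hv
        exact (PySem.Set.mem_ofList _ _).1 hv
      exact (h2char v).2 ((hr v).1 (h v hvt))
  rw [hcond]
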